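-- pv_equiv track=rewrite | github.com/wyattscarpenter/foobar_with_google | 4-2 free-the-bunny-workers.py | solution
-- ===== SOURCE A (Python) =====
-- from itertools import combinations, product, combinations_with_replacement
-- from itertools import combinations
--
-- def filtertranspose(iterable): return [list(filter(lambda item: item is not None, l)) for l in zip(*iterable)]
--
-- def solution(num_buns, num_required):
--   """The problem this solution solves is phrased somewhat obscurely in the problem statement. However, the problem is simple: Ignore the fiction behind the variable names. The idea of the problem is to make `num_buns` lists of tokens such that picking any `num_required` of said lists is guaranteed to union together to produce the full set of tokens, but picking any `num_required-1` of said lists is guaranteed NOT to union together to produce the full set of tokens. The tokens are arbitrary, but numbered. num_buns will always be between 1 and 9, and num_required will always be between 0 and 9 (both inclusive).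
--
--   I initially found this problem tricky, because it was so tantalizingly close to the logic and form of mathematical combination; I was sure there was a closed-form solution! (As opposed to a brute-force or dynamic-programming solution) Eventually, by visual inspection of the (3,5) case, I realized the general solution was essentially a transposition of the matrix created by combinations(n,r)."""
--   #Known constrains/edge cases/degenerate cases:
--   if num_required > num_buns: raise ValueError("Frankly I don't know what to do when you need more bunnies than you have bunnies.")
--   if num_required == 0: return [[] for i in range(num_buns)] #This is my educated guess about what it means to require 0: the bunnies can just walk up and press the buttons, no keys (ie: empty list) required. It turns out that no test case requires this to be handled.
--   #You don't need these, because our general logic handles them, but they are somewhat interesting: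
--   """
--   if num_required == 1: return [[0] for i in range(num_buns)]
--   if num_required == num_buns: return [[x] for x in range(num_required)] #see, this really makes it seem like nCr
--   if num_required == num_buns-1: return list(map(list,combinations(range(num_buns),num_required)))
--   """
--   return filtertranspose(
--     [ [(i if ranger in c else None) for ranger in range(num_buns)] for i, c in enumerate(combinations(range(num_buns), num_buns-num_required+1))] #this populates the n choose r matrix with convenient values to be filtertransposed. Note that the num_buns-num_required+1 is just logic to reverse middle cases because of how the pattern gets laid out; not mathematically interesting.
--   )
-- ===== SOURCE B (Python) =====
-- from itertools import combinations
--
-- def solution(num_buns, num_required):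
--   if num_required > num_buns: raise ValueError("Frankly I don't know what to do when you need more bunnies than you have bunnies.")
--   if num_required == 0: return [[] for i in range(num_buns)]
--   keys = list(enumerate(combinations(range(num_buns), num_buns - num_required + 1)))
--   holders = sorted({b for _, c in keys for b in c})
--   return [[i for i, c in keys if b in c] for b in holders]
-- ===== Notes on version B (the rewrite author's own statement) =====
-- stated objective: alternative
-- what changed: B drops A's None-placeholder matrix, zip(*) transpose and None-filter: it collects the set of bunnies occurring in the combinations and builds each bunny's key list directly by one filtering comprehension over the enumerated combinations.
import Mathlib
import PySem

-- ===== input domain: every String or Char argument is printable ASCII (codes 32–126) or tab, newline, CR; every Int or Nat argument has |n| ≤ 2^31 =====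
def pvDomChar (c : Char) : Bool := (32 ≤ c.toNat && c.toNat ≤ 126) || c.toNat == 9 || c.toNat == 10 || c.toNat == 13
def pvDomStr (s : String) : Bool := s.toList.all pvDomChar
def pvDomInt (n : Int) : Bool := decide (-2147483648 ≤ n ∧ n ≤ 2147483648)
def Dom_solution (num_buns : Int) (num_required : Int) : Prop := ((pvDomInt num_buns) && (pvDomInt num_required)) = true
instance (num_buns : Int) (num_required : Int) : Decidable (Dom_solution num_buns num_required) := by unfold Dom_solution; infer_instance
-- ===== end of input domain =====

-- B replaces A's None-placeholder matrix + zip(*) transpose + None-filter with a direct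
-- per-holder filtering pass over the enumerated combinations (objective: alternative).

-- ===== PORT A =====
-- itertools.combinations(xs, k): the k-subsequences of xs in lexicographic order (exact port of
-- the builtin's contract, including its 'if r > n: return' short-circuit)
def pyCombinations : List Int → Nat → List (List Int)
  | _, 0 => [[]]
  | [], _+1 => []
  | x :: xs, k+1 =>
      if xs.length < k then []
      else (pyCombinations xs k).map (x :: ·) ++ pyCombinations xs (k+1)

-- zip(*rows): transpose truncating at the shortest row (exact port of the builtin's contract; rows = [] → [])
def pyZipStar (rows : List (List (Option Int))) : List (List (Option Int)) :=
  match rows with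
  | [] => []
  | r0 :: rest =>
      let m := (rest.map List.length).foldl min r0.length
      (List.range m).map (fun j => rows.map (fun r => r.getD j none))

-- list(filter(lambda item: item is not None, l)) on each transposed row: keep and unwrap the somes
def filtertranspose (rows : List (List (Option Int))) : List (List Int) :=
  (pyZipStar rows).map (fun l => l.filterMap id)

def solution (num_buns : Int) (num_required : Int) : List (List Int) :=
  if num_required > num_buns then []  -- raises ValueError in Python; excluded by Pre_solution
  else if num_required = 0 then (List.range num_buns.toNat).map (fun _ => [])
  else
    -- here num_buns - num_required + 1 ≥ 1, so .toNat is exact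
    filtertranspose
      ((PySem.List.enumerate (pyCombinations (PySem.List.pyRange 0 num_buns 1) (num_buns - num_required + 1).toNat) 0).map
        (fun ic => (PySem.List.pyRange 0 num_buns 1).map (fun ranger => if ranger ∈ ic.2 then some ic.1 else none)))

-- ===== PORT B =====
def solution_alt (num_buns : Int) (num_required : Int) : List (List Int) :=
  if num_required > num_buns then []  -- raises ValueError in Python; excluded by Pre_solution
  else if num_required = 0 then (List.range num_buns.toNat).map (fun _ => [])
  else
    let keys := PySem.List.enumerate (pyCombinations (PySem.List.pyRange 0 num_buns 1) (num_buns - num_required + 1).toNat) 0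
    let holders := PySem.List.sorted (PySem.Set.ofList (keys.flatMap (fun ic => ic.2))) (fun x => x) false
    holders.map (fun b => keys.filterMap (fun ic => if b ∈ ic.2 then some ic.1 else none))

-- ===== PRECONDITION & SPEC =====
-- A raises ValueError exactly when num_required > num_buns; Pre_ excludes exactly those inputs.
def Pre_solution (num_buns : Int) (num_required : Int) : Prop := num_required ≤ num_buns
instance (num_buns : Int) (num_required : Int) : Decidable (Pre_solution num_buns num_required) := by unfold Pre_solution; infer_instance
def pvWitness_solution : Int × Int := (3, 2)

def Spec_solution (num_buns : Int) (num_required : Int) (out : List (List Int)) : Prop := out = solution_alt num_buns num_required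
instance (num_buns : Int) (num_required : Int) (out : List (List Int)) : Decidable (Spec_solution num_buns num_required out) := by unfold Spec_solution; infer_instance

-- ===== CLAIM (what is proved, stated in full; the proofs are below) =====
def Claim_equal_solution : Prop := ∀ (num_buns : Int) (num_required : Int), Dom_solution num_buns num_required → Pre_solution num_buns num_required → Spec_solution num_buns num_required (solution num_buns num_required)

-- ===== LEMMAS AND PROOFS =====

lemma comb_eq_nil (xs : List Int) (k : Nat) (h : xs.length < k) : pyCombinations xs k = [] := by
  induction xs generalizing k with
  | nil => cases k with
    | zero => simp at h
    | succ k => rfl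
  | cons x xs ih =>
    cases k with
    | zero => simp at h
    | succ k =>
      simp only [List.length_cons] at h
      simp [pyCombinations, if_pos (show xs.length < k by omega)]

lemma comb_ne_nil (xs : List Int) (k : Nat) (h : k ≤ xs.length) : pyCombinations xs k ≠ [] := by
  induction xs generalizing k with
  | nil => cases k with
    | zero => simp [pyCombinations]
    | succ k => simp at h
  | cons x xs ih =>
    cases k with
    | zero => simp [pyCombinations]
    | succ k =>
      simp only [List.length_cons] at h
      have := ih k (by omega)
      simp only [pyCombinations, if_neg (show ¬ xs.length < k by omega), ne_eq,
        List.append_eq_nil_iff, List.map_eq_nil_iff, not_and]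
      intro h1
      exact absurd h1 this

lemma comb_sublist {xs c : List Int} {k : Nat} (h : c ∈ pyCombinations xs k) : c.Sublist xs := by
  induction xs generalizing c k with
  | nil => cases k with
    | zero => simp [pyCombinations] at h; simp [h]
    | succ k => simp [pyCombinations] at h
  | cons x xs ih =>
    cases k with
    | zero => simp [pyCombinations] at h; simp [h]
    | succ k =>
      by_cases hg : xs.length < k
      · rw [pyCombinations, if_pos hg] at h
        simp at h
      · rw [pyCombinations, if_neg hg] at h
        simp only [List.mem_append, List.mem_map] at h
        rcases h with ⟨c', hc', rfl⟩ | h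
        · exact (ih hc').cons₂ x
        · exact (ih h).cons x

-- every element of xs occurs in some k-combination (1 ≤ k ≤ |xs|)
lemma comb_cover {xs : List Int} {k : Nat} (hk : 1 ≤ k) (hlen : k ≤ xs.length)
    {x : Int} (hx : x ∈ xs) : ∃ c ∈ pyCombinations xs k, x ∈ c := by
  induction xs generalizing k with
  | nil => simp at hx
  | cons y xs ih =>
    cases k with
    | zero => omega
    | succ k =>
      simp only [List.length_cons] at hlen
      have hg : ¬ xs.length < k := by omega
      rw [pyCombinations, if_neg hg]
      rcases List.mem_cons.mp hx with rfl | hx'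
      · obtain ⟨c0, hc0⟩ := List.exists_mem_of_ne_nil _ (comb_ne_nil xs k (by omega))
        refine ⟨x :: c0, ?_, by simp⟩
        simp only [List.mem_append, List.mem_map]
        exact Or.inl ⟨c0, hc0, rfl⟩
      · cases k with
        | zero =>
          obtain ⟨c, hc, hxc⟩ := ih (k := 1) (by omega)
            (by have := List.length_pos_of_mem hx'; omega) hx'
          refine ⟨c, ?_, hxc⟩
          simp only [List.mem_append]
          exact Or.inr hc
        | succ k' =>
          obtain ⟨c, hc, hxc⟩ := ih (k := k'+1) (by omega) (by omega) hx'
          refine ⟨y :: c, ?_, by simp [hxc]⟩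
          simp only [List.mem_append, List.mem_map]
          exact Or.inl ⟨c, hc, rfl⟩

lemma foldl_min_const (l : List Nat) (n : Nat) (h : ∀ x ∈ l, x = n) : l.foldl min n = n := by
  induction l with
  | nil => rfl
  | cons x l ih =>
    have hx := h x (by simp)
    simp only [List.foldl_cons, hx, min_self]
    exact ih (fun y hy => h y (by simp [hy]))

lemma zipStar_char (rows : List (List (Option Int))) (n : Nat)
    (h : ∀ row ∈ rows, row.length = n) (hne : rows ≠ []) :
    pyZipStar rows = (List.range n).map (fun j => rows.map (fun r => r.getD j none)) := by
  match rows, hne with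
  | r0 :: rest, _ =>
    have h0 : r0.length = n := h r0 (by simp)
    have hm : (rest.map List.length).foldl min r0.length = n := by
      rw [h0]
      exact foldl_min_const _ n (fun x hx => by
        obtain ⟨row, hrow, rfl⟩ := List.mem_map.mp hx
        exact h row (by simp [hrow]))
    simp only [pyZipStar, hm]

-- the holders of B's main branch are exactly range(num_buns), in order
lemma holders_eq (b : Int) (k : Nat) (hk : 1 ≤ k) (hkle : k ≤ (PySem.List.pyRange 0 b 1).length) :
    PySem.List.sorted (PySem.Set.ofList
        ((PySem.List.enumerate (pyCombinations (PySem.List.pyRange 0 b 1) k) 0).flatMap (fun ic => ic.2)))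
      (fun x => x) false = PySem.List.pyRange 0 b 1 := by
  set xs := PySem.List.pyRange 0 b 1 with hxs
  set L := pyCombinations xs k with hL
  set E := PySem.List.enumerate L 0 with hE
  have hmemflat : ∀ x : Int, x ∈ E.flatMap (fun ic => ic.2) ↔ x ∈ xs := by
    intro x
    rw [List.mem_flatMap]
    constructor
    · rintro ⟨ic, hic, hx⟩
      have : ic.2 ∈ L := by
        have := List.mem_map_of_mem (f := fun p => p.2) hic
        rwa [hE, PySem.List.map_snd_enumerate] at this
      exact (comb_sublist this).mem hx
    · intro hx
      obtain ⟨c, hc, hxc⟩ := comb_cover hk hkle hx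
      obtain ⟨m, hm, rfl⟩ := List.getElem_of_mem hc
      refine ⟨((0 : Int) + m, L[m]), ?_, hxc⟩
      rw [hE]
      exact (PySem.List.mem_enumerate_iff _ _ _).mpr ⟨m, hm, rfl⟩
  apply PySem.List.sorted_eq_of_perm_of_pairwise_lt
  · rw [List.perm_ext_iff_of_nodup (PySem.List.nodup_pyRange_one 0 b)
      (PySem.Set.nodup_ofList _)]
    intro x
    rw [PySem.Set.mem_ofList, hmemflat]
  · exact PySem.List.pairwise_lt_pyRange_one 0 b

lemma main_eq (b r : Int) (h1 : 1 ≤ r) (h2 : r ≤ b) : solution b r = solution_alt b r := by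
  have hng : ¬ r > b := by omega
  have hnz : ¬ r = 0 := by omega
  rw [solution, solution_alt, if_neg hng, if_neg hng, if_neg hnz, if_neg hnz]
  have hxslen : (PySem.List.pyRange 0 b 1).length = b.toNat := by
    rw [PySem.List.length_pyRange_one]; omega
  have hkle : (b - r + 1).toNat ≤ (PySem.List.pyRange 0 b 1).length := by rw [hxslen]; omega
  have hk1 : 1 ≤ (b - r + 1).toNat := by omega
  have hLne : pyCombinations (PySem.List.pyRange 0 b 1) (b - r + 1).toNat ≠ [] :=
    comb_ne_nil _ _ hkle
  -- B side: zeta-reduce the lets, then rewrite the holders to range(num_buns)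
  change _ = (PySem.List.sorted (PySem.Set.ofList
      ((PySem.List.enumerate (pyCombinations (PySem.List.pyRange 0 b 1) (b - r + 1).toNat) 0).flatMap
        (fun ic => ic.2))) (fun x => x) false).map
    (fun bb => (PySem.List.enumerate (pyCombinations (PySem.List.pyRange 0 b 1) (b - r + 1).toNat) 0).filterMap
      (fun ic => if bb ∈ ic.2 then some ic.1 else none))
  rw [holders_eq b (b - r + 1).toNat hk1 hkle]
  -- A side: transpose characterisation
  have hrowlen : ∀ row ∈ (PySem.List.enumerate (pyCombinations (PySem.List.pyRange 0 b 1) (b - r + 1).toNat) 0).map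
      (fun ic => (PySem.List.pyRange 0 b 1).map (fun ranger => if ranger ∈ ic.2 then some ic.1 else none)),
      row.length = b.toNat := by
    intro row hrow
    obtain ⟨ic, _, rfl⟩ := List.mem_map.mp hrow
    simp [hxslen]
  have hrne : (PySem.List.enumerate (pyCombinations (PySem.List.pyRange 0 b 1) (b - r + 1).toNat) 0).map
      (fun ic => (PySem.List.pyRange 0 b 1).map (fun ranger => if ranger ∈ ic.2 then some ic.1 else none)) ≠ [] := by
    simp only [ne_eq, List.map_eq_nil_iff]
    intro hnil
    have := PySem.List.length_enumerate (pyCombinations (PySem.List.pyRange 0 b 1) (b - r + 1).toNat) 0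
    rw [hnil] at this
    simp at this
    exact hLne (List.length_eq_zero_iff.mp this.symm)
  rw [filtertranspose, zipStar_char _ b.toNat hrowlen hrne, List.map_map]
  -- both sides are maps producing, per bunny j, the key indices whose combination contains j
  apply List.ext_getElem
  · simp [PySem.List.length_pyRange_one]
  intro j hj1 hj2
  have hjn : j < b.toNat := by simpa using hj1
  simp only [List.getElem_map, List.getElem_range]
  rw [PySem.List.getElem_pyRange_one 0 b j (by omega)]
  have hcol : ((PySem.List.enumerate (pyCombinations (PySem.List.pyRange 0 b 1) (b - r + 1).toNat) 0).map
        (fun ic => (PySem.List.pyRange 0 b 1).map (fun ranger => if ranger ∈ ic.2 then some ic.1 else none))).map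
        (fun row => row.getD j none)
      = (PySem.List.enumerate (pyCombinations (PySem.List.pyRange 0 b 1) (b - r + 1).toNat) 0).map
        (fun ic => if (j : Int) ∈ ic.2 then some ic.1 else none) := by
    rw [List.map_map]
    apply List.map_congr_left
    intro ic _
    show ((PySem.List.pyRange 0 b 1).map (fun ranger => if ranger ∈ ic.2 then some ic.1 else none)).getD j none = _
    have hbn : ((b.toNat : Int)) = b := by omega
    rw [List.getD_eq_getElem?_getD, ← hbn,
      PySem.List.getElem?_map_pyRange_zero _ b.toNat j hjn]
    rfl
  show (((PySem.List.enumerate (pyCombinations (PySem.List.pyRange 0 b 1) (b - r + 1).toNat) 0).map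
        (fun ic => (PySem.List.pyRange 0 b 1).map (fun ranger => if ranger ∈ ic.2 then some ic.1 else none))).map
        (fun row => row.getD j none)).filterMap id = _
  rw [hcol, List.filterMap_map, Function.id_comp, zero_add]

lemma neg_case (b r : Int) (hr : r < 0) (h2 : r ≤ b) : solution b r = solution_alt b r := by
  have hng : ¬ r > b := by omega
  have hnz : ¬ r = 0 := by omega
  rw [solution, solution_alt, if_neg hng, if_neg hng, if_neg hnz, if_neg hnz]
  have hcomb : pyCombinations (PySem.List.pyRange 0 b 1) (b - r + 1).toNat = [] :=
    comb_eq_nil _ _ (by rw [PySem.List.length_pyRange_one]; omega)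
  rw [hcomb]
  simp [PySem.List.enumerate, filtertranspose, pyZipStar, PySem.Set.ofList, PySem.List.sorted]

-- ===== VERDICT (by name: the statement is the Claim_ definition above) =====
theorem solution_spec : Claim_equal_solution := by
  intro b r _ hpre
  show solution b r = solution_alt b r
  rcases lt_trichotomy r 0 with hr | hr | hr
  · exact neg_case b r hr hpre
  · subst hr; rw [solution, solution_alt]; simp
  · exact main_eq b r (by omega) hpre
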